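-- pv_equiv track=rewrite | github.com/xunxiing/astrbot_plugin_ctx_trimmer | main.py | _drop_old_turns
-- ===== SOURCE A (Python) =====
-- from typing import Any, Dict, List, Optional, Union
--
-- def _drop_old_turns(contexts: List[Dict[str, Any]], turns: int) -> List[Dict[str, Any]]:
--     """
--     以“用户发言”为轮次边界，丢弃最早的 N 轮对话：
--     从最早的 user 开始，删除直到第 N+1 个 user 出现的前一个位置（含期间的 assistant/tool）。
--     """
--     if turns <= 0 or not contexts:
--         return contexts
--
--     user_indices = [i for i, m in enumerate(contexts) if (m.get("role") == "user")]
--     if not user_indices: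
--         # 没有 user，直接清空更安全
--         return []
--
--     k = min(turns, len(user_indices))
--     # 如果 k 等于现有 user 轮数，说明要丢到末尾
--     if k == len(user_indices):
--         return []
--
--     cut_to = user_indices[k]  # 第 k+1 个 user 的索引位置
--     return contexts[cut_to:]
-- ===== SOURCE B (Python) =====
-- from typing import Any, Dict, List
--
-- def _drop_old_turns(contexts: List[Dict[str, Any]], turns: int) -> List[Dict[str, Any]]:
--     if turns <= 0 or not contexts:
--         return contexts
--     # number of user turns that must survive
--     keep = sum(1 for m in contexts if m.get("role") == "user") - turns
--     if keep <= 0: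
--         return []
--     # walk backwards, collecting messages until the keep-th user (from the end)
--     out = []
--     for m in reversed(contexts):
--         out.append(m)
--         if m.get("role") == "user":
--             keep -= 1
--             if keep == 0:
--                 break
--     out.reverse()
--     return out
-- ===== Notes on version B (the rewrite author's own statement) =====
-- stated objective: alternative
-- what changed: Instead of collecting all user indices and slicing forward at the (turns+1)-th, B first counts the total users, computes how many user turns must survive, then walks the list BACKWARDS building the kept suffix until the keep-th user from the end, so no index list and no slice is used.
import Mathlib
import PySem

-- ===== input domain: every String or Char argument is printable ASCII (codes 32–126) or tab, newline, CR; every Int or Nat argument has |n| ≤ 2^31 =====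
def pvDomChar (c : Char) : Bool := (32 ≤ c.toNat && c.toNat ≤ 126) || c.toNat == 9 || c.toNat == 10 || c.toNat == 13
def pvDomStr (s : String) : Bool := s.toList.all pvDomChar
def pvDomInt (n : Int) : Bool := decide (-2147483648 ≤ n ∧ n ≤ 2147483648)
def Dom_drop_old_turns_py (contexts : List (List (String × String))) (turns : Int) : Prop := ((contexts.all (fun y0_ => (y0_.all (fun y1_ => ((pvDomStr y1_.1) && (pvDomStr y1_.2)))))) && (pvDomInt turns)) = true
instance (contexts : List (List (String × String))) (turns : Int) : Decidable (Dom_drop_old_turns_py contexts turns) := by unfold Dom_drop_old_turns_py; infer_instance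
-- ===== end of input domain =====

-- B replaces A's forward index-list + slice by: count the users, compute how many
-- user turns survive, then collect the kept suffix walking BACKWARDS; objective:
-- alternative (same O(n) cost, no index list, no slicing).

-- m.get("role") == "user": dict lookup = first match in the association list
def pyIsUser (m : List (String × String)) : Bool := List.lookup "role" m == some "user"

-- ===== PORT A =====
def drop_old_turns_py (contexts : List (List (String × String))) (turns : Int) : List (List (String × String)) :=
  if turns ≤ 0 ∨ contexts = [] then contexts
  else
    -- user_indices = [i for i, m in enumerate(contexts) if m.get("role") == "user"]
    let user_indices : List Int :=
      ((PySem.List.enumerate contexts 0).filter (fun p => pyIsUser p.2)).map (·.1)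
    if user_indices = [] then []
    else
      let k : Int := min turns (user_indices.length : Int)
      if k = (user_indices.length : Int) then []
      else
        -- user_indices[k]: k is provably in range here, so the default of pyGetD is never used
        let cut_to : Int := PySem.List.pyGetD user_indices k 0
        PySem.List.slice contexts (some cut_to) none

-- ===== PORT B =====
-- `for m in reversed(contexts): out.append(m); …; out.reverse(); return out`
-- (the break when keep hits 0; exhaustion returns everything collected)
def bLoop : List (List (String × String)) → Int → List (List (String × String)) → List (List (String × String))
  | [], _, out => out.reverse
  | m :: ms, keep, out =>
    let out := out ++ [m]
    if pyIsUser m then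
      if keep - 1 = 0 then out.reverse
      else bLoop ms (keep - 1) out
    else bLoop ms keep out

def drop_old_turns_py_alt (contexts : List (List (String × String))) (turns : Int) : List (List (String × String)) :=
  if turns ≤ 0 ∨ contexts = [] then contexts
  else
    -- keep = sum(1 for m in contexts if m.get("role") == "user") - turns
    let keep : Int := (contexts.foldl (fun n m => if pyIsUser m then n + 1 else n) (0 : Int)) - turns
    if keep ≤ 0 then []
    else bLoop contexts.reverse keep []

-- ===== PRECONDITION & SPEC =====
def Spec_drop_old_turns_py (contexts : List (List (String × String))) (turns : Int) (out : List (List (String × String))) : Prop := out = drop_old_turns_py_alt contexts turns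
instance (contexts : List (List (String × String))) (turns : Int) (out : List (List (String × String))) : Decidable (Spec_drop_old_turns_py contexts turns out) := by unfold Spec_drop_old_turns_py; infer_instance

-- ===== CLAIM (what is proved, stated in full; the proofs are below) =====
def Claim_equal_drop_old_turns_py : Prop := ∀ (contexts : List (List (String × String))) (turns : Int), Dom_drop_old_turns_py contexts turns → Spec_drop_old_turns_py contexts turns (drop_old_turns_py contexts turns)

-- ===== LEMMAS AND PROOFS =====

-- number of user messages
def usersN : List (List (String × String)) → Nat
  | [] => 0
  | m :: ms => (if pyIsUser m then 1 else 0) + usersN ms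

-- absolute positions (from offset n) of the user messages, the common reference point
def uidx : List (List (String × String)) → Nat → List Nat
  | [], _ => []
  | m :: ms, n => if pyIsUser m then n :: uidx ms (n + 1) else uidx ms (n + 1)

-- prefix up to and including the k-th user (whole list if fewer than k users)
def takeToUser : List (List (String × String)) → Nat → List (List (String × String))
  | [], _ => []
  | m :: ms, k =>
    m :: (if pyIsUser m then (if k = 1 then [] else takeToUser ms (k - 1)) else takeToUser ms k)

theorem uidx_of_enumerate (l : List (List (String × String))) (n : Nat) :
    ((PySem.List.enumerate l (n : Int)).filter (fun p => pyIsUser p.2)).map (·.1)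
      = (uidx l n).map (fun (j : Nat) => (j : Int)) := by
  induction l generalizing n with
  | nil => rfl
  | cons m ms ih =>
    rw [PySem.List.enumerate_cons, List.filter_cons]
    have hc : ((n : Int) + 1) = ((n + 1 : Nat) : Int) := by push_cast; ring
    rw [hc]
    by_cases h : pyIsUser m = true
    · simp only [h, uidx, if_true, List.map_cons, ih]
    · simp only [h, uidx, if_false, Bool.false_eq_true, ih]

theorem uidx_length (l : List (List (String × String))) (n : Nat) :
    (uidx l n).length = usersN l := by
  induction l generalizing n with
  | nil => rfl
  | cons m ms ih =>
    by_cases h : pyIsUser m = true <;> simp [uidx, usersN, h, ih] <;> omega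

theorem usersN_foldl (l : List (List (String × String))) (a : Int) :
    l.foldl (fun n m => if pyIsUser m then n + 1 else n) a = a + (usersN l : Int) := by
  induction l generalizing a with
  | nil => simp [usersN]
  | cons m ms ih =>
    by_cases h : pyIsUser m = true <;>
      simp [usersN, h, ih] <;> push_cast <;> ring

-- characterisation of A (as in the forward formulation)
theorem portA_char (contexts : List (List (String × String))) (turns : Int)
    (h1 : 1 ≤ turns) (h2 : contexts ≠ []) :
    drop_old_turns_py contexts turns =
      match (uidx contexts 0)[turns.toNat]? with
      | some j => contexts.drop j
      | none => [] := by
  have h0 := uidx_of_enumerate contexts 0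
  rw [Nat.cast_zero] at h0
  have hguard : ¬ (turns ≤ 0 ∨ contexts = []) := by
    push Not; exact ⟨by omega, h2⟩
  simp only [drop_old_turns_py, hguard, if_false, h0]
  generalize uidx contexts 0 = U
  rcases U with _ | ⟨u, us⟩
  · rfl
  · set U := u :: us with hUdef
    have hmapnil : ¬ (U.map (fun (j : Nat) => (j : Int)) = []) := by simp [hUdef]
    rw [if_neg hmapnil]
    simp only [List.length_map]
    by_cases hge : (U.length : Int) ≤ turns
    · rw [if_pos (by omega), List.getElem?_eq_none (by omega)]
    · have htlt : turns.toNat < U.length := by omega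
      have hk : min turns (U.length : Int) = turns := by omega
      rw [if_neg (by omega), hk]
      rw [PySem.List.pyGetD_eq_getElem _ 0 (by omega)
        (by simp only [List.length_map]; omega)]
      rw [List.getElem?_eq_getElem htlt]
      rw [List.getElem_map, PySem.List.slice_from _ (by positivity)]
      simp only [Int.toNat_natCast]

-- the backward loop collects exactly the prefix (of the reversed list) up to the keep-th user
theorem bLoop_eq (r : List (List (String × String))) (keep : Int) (out : List (List (String × String)))
    (h1 : 1 ≤ keep) :
    bLoop r keep out = (out ++ takeToUser r keep.toNat).reverse := by
  induction r generalizing keep out with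
  | nil => simp [bLoop, takeToUser]
  | cons m ms ih =>
    by_cases h : pyIsUser m = true
    · by_cases he : keep - 1 = 0
      · have ht : keep.toNat = 1 := by omega
        simp [bLoop, takeToUser, h, he, ht]
      · have ht : (keep - 1).toNat = keep.toNat - 1 := by omega
        have hk1 : ¬ keep.toNat = 1 := by omega
        simp only [bLoop, h, if_true, he, if_false]
        rw [ih (keep - 1) _ (by omega), ht]
        simp [takeToUser, h, hk1]
    · simp only [bLoop, h, if_false, Bool.false_eq_true]
      rw [ih keep _ h1]
      simp [takeToUser, h]

-- takeToUser splits over an append at the user count of the first part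
theorem takeToUser_append (r s : List (List (String × String))) (k : Nat) (h1 : 1 ≤ k) :
    takeToUser (r ++ s) k =
      if k ≤ usersN r then takeToUser r k else r ++ takeToUser s (k - usersN r) := by
  induction r generalizing k with
  | nil => simp [usersN, takeToUser]; omega
  | cons m ms ih =>
    by_cases h : pyIsUser m = true
    · by_cases hk : k = 1
      · simp [takeToUser, usersN, h, hk]
      · have h2 : 1 ≤ k - 1 := by omega
        simp only [List.cons_append, takeToUser, h, if_true, hk, if_false, ih (k-1) h2, usersN]
        by_cases hle : k - 1 ≤ usersN ms
        · rw [if_pos hle, if_pos (by omega)]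
        · rw [if_neg hle, if_neg (by omega)]
          have : k - (1 + usersN ms) = k - 1 - usersN ms := by omega
          simp [this]
    · simp only [List.cons_append, takeToUser, h, if_false, Bool.false_eq_true, ih k h1, usersN]
      by_cases hle : k ≤ usersN ms
      · rw [if_pos hle, if_pos (by simpa [h] using hle)]
      · rw [if_neg hle, if_neg (by simp [h]; omega)]
        simp [h]

theorem usersN_reverse (l : List (List (String × String))) : usersN l.reverse = usersN l := by
  induction l with
  | nil => rfl
  | cons m ms ih =>
    rw [List.reverse_cons]
    have : usersN (ms.reverse ++ [m]) = usersN ms.reverse + usersN [m] := by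
      clear ih
      induction ms.reverse with
      | nil => simp [usersN]
      | cons x xs ih2 => simp [usersN, ih2]; omega
    simp [this, usersN, ih]
    by_cases h : pyIsUser m = true <;> simp [h] <;> omega

theorem map_add_shift (u : List Nat) (n : Nat) :
    (u.map (fun a => a + 1)).map (fun a => a + n) = u.map (fun a => a + (n + 1)) := by
  rw [List.map_map]
  apply List.map_congr_left
  intro a _
  simp [Function.comp]
  omega

theorem uidx_shift (t : List (List (String × String))) (n : Nat) :
    uidx t n = (uidx t 0).map (fun a => a + n) := by
  induction t generalizing n with
  | nil => rfl
  | cons x xs ihx =>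
    by_cases hx : pyIsUser x = true
    · simp only [uidx, hx, if_true, List.map_cons, Nat.zero_add]
      rw [ihx (n + 1), ihx 1, map_add_shift]
    · simp only [uidx, hx, if_false, Bool.false_eq_true]
      rw [ihx (n + 1), ihx 1, map_add_shift]

-- the main backward/forward correspondence
theorem takeToUser_reverse (l : List (List (String × String))) (k : Nat)
    (h1 : 1 ≤ k) (h2 : k ≤ usersN l) :
    ∀ j, (uidx l 0)[usersN l - k]? = some j →
      (takeToUser l.reverse k).reverse = l.drop j := by
  induction l generalizing k with
  | nil => simp [usersN] at h2; omega
  | cons m ms ih =>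
    intro j hj
    rw [List.reverse_cons, takeToUser_append _ _ _ h1, usersN_reverse]
    by_cases hle : k ≤ usersN ms
    · rw [if_pos hle]
      -- the k-th user from the end lies inside ms
      have hlt : usersN (m :: ms) - k ≥ usersN (m :: ms) - usersN ms := by omega
      by_cases h : pyIsUser m = true
      · have hu : usersN (m :: ms) = 1 + usersN ms := by simp [usersN, h]
        have hidx : usersN (m :: ms) - k = (usersN ms - k) + 1 := by omega
        rw [hidx] at hj
        simp only [uidx, h, if_true, List.getElem?_cons_succ] at hj
        rw [uidx_shift ms 1, List.getElem?_map] at hj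
        rcases ho : (uidx ms 0)[usersN ms - k]? with _ | j'
        · rw [ho] at hj; simp at hj
        · rw [ho] at hj
          simp only [Option.map_some, Option.some.injEq] at hj
          rw [← hj, List.drop_succ_cons]
          exact ih k h1 hle j' ho
      · have hu : usersN (m :: ms) = usersN ms := by simp [usersN, h]
        rw [hu] at hj
        simp only [uidx, h, if_false, Bool.false_eq_true] at hj
        rw [uidx_shift ms 1, List.getElem?_map] at hj
        rcases ho : (uidx ms 0)[usersN ms - k]? with _ | j'
        · rw [ho] at hj; simp at hj
        · rw [ho] at hj
          simp only [Option.map_some, Option.some.injEq] at hj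
          rw [← hj, List.drop_succ_cons]
          exact ih k h1 hle j' ho
    · rw [if_neg hle]
      -- m itself is the k-th user from the end: keep the whole list
      have h : pyIsUser m = true := by
        by_contra hm
        simp [usersN, hm] at h2; omega
      have hu : usersN (m :: ms) = 1 + usersN ms := by simp [usersN, h]
      have hk : k = usersN ms + 1 := by omega
      have hidx : usersN (m :: ms) - k = 0 := by omega
      rw [hidx] at hj
      simp only [uidx, h, if_true, List.getElem?_cons_zero, Option.some.injEq] at hj
      have hro : k - usersN ms = 1 := by omega
      rw [hro]
      simp [takeToUser, ← hj]

-- ===== VERDICT (by name: the statement is the Claim_ definition above) =====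
theorem drop_old_turns_py_spec : Claim_equal_drop_old_turns_py := by
  intro contexts turns _
  unfold Spec_drop_old_turns_py
  by_cases hg : turns ≤ 0 ∨ contexts = []
  · simp [drop_old_turns_py, drop_old_turns_py_alt, hg]
  · have h1 : 1 ≤ turns := by rcases not_or.mp hg with ⟨h, _⟩; omega
    have h2 : contexts ≠ [] := (not_or.mp hg).2
    rw [portA_char contexts turns h1 h2]
    unfold drop_old_turns_py_alt
    rw [if_neg hg, usersN_foldl, zero_add]
    set U := usersN contexts with hU
    by_cases hkeep : (U : Int) - turns ≤ 0
    · rw [if_pos hkeep, List.getElem?_eq_none (by rw [uidx_length]; omega)]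
    · rw [if_neg hkeep]
      have hlen : turns.toNat < (uidx contexts 0).length := by rw [uidx_length]; omega
      rcases ho : (uidx contexts 0)[turns.toNat]? with _ | j
      · rw [List.getElem?_eq_none_iff] at ho; omega
      · have hkt : ((U : Int) - turns).toNat = U - turns.toNat := by omega
        have hidx : U - (U - turns.toNat) = turns.toNat := by omega
        rw [bLoop_eq _ _ _ (by omega), List.nil_append, hkt]
        exact (takeToUser_reverse contexts (U - turns.toNat) (by omega) (by omega) j
          (by rw [hidx]; exact ho)).symm
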